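-- pv_equiv track=rewrite | github.com/rising-star92/seller-axis-api | selleraxis/core/utils.py | from_data_to_object_ids
-- ===== SOURCE A (Python) =====
-- def from_data_to_object_ids(data):
--     unique_ids = []
--     if isinstance(data, list):
--         for obj in data:
--             unique_id = obj.get("id")
--             if unique_id and unique_id not in unique_ids:
--                 unique_ids.append(obj["id"])
--
--     return unique_ids
-- ===== SOURCE B (Python) =====
-- def from_data_to_object_ids(data):
--     if not isinstance(data, list):
--         return []
--     ids = [v for v in (obj.get("id") for obj in data) if v]
--
--     def dedup(xs):
--         # keep the head, strip every later copy of it from the tail, recurse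
--         if not xs:
--             return []
--         head = xs[0]
--         return [head] + dedup([y for y in xs[1:] if y != head])
--
--     return dedup(ids)
-- ===== Notes on version B (the rewrite author's own statement) =====
-- stated objective: alternative
-- what changed: Replaces A's single accumulator loop with a per-element membership scan by a staged design: first collect truthy ids, then deduplicate with a recursive keep-head / filter-head-out-of-tail procedure (no accumulator, no membership test against the result).
import Mathlib
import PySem

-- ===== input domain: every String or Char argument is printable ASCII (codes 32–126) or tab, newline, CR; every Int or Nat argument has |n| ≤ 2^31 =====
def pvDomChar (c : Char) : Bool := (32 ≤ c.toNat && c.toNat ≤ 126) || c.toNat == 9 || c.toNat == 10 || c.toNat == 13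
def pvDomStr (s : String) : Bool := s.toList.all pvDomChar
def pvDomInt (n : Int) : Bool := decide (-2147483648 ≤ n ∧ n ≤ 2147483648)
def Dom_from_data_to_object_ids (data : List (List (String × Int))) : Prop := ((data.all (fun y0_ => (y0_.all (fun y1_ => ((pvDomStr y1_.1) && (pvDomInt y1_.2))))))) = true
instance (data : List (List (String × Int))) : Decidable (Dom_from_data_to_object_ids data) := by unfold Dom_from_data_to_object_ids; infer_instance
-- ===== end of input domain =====

-- B replaces A's accumulator loop with its membership test by a staged design: collect the truthy ids,
-- then deduplicate recursively by keeping the head and filtering its copies out of the tail (alternative; same cost).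
-- ===== PORT A =====
-- Port of A: explicit loop, append when the id is truthy and not already collected.
def from_data_to_object_ids (data : List (List (String × Int))) : List Int :=
  data.foldl (fun unique_ids obj =>
      match (obj.find? (fun p => p.1 == "id")).map Prod.snd with
      | some uid => if uid ≠ 0 ∧ uid ∉ unique_ids then unique_ids ++ [uid] else unique_ids
      | none => unique_ids) []

-- ===== PORT B =====
-- B's helper dedup: keep the head, strip later copies of it from the tail, recurse.
def pvDedup : List Int → List Int
  | [] => []
  | x :: xs => x :: pvDedup (xs.filter (fun y => y != x))
termination_by l => l.length
decreasing_by
  simp only [List.length_unattach, List.length_cons]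
  exact Nat.lt_succ_of_le (xs.attach.length_filter_le _ |>.trans (by simp))

-- Port of B: the truthy ids (obj.get("id") kept when truthy), then dedup.
def from_data_to_object_ids_alt (data : List (List (String × Int))) : List Int :=
  let ids := (data.map (fun obj => (obj.find? (fun p => p.1 == "id")).map Prod.snd)).filterMap
      (fun v => match v with
        | some x => if x ≠ 0 then some x else none
        | none => none)
  pvDedup ids

-- ===== PRECONDITION & SPEC =====
def Spec_from_data_to_object_ids (data : List (List (String × Int))) (out : List Int) : Prop := out = from_data_to_object_ids_alt data
instance (data : List (List (String × Int))) (out : List Int) : Decidable (Spec_from_data_to_object_ids data out) := by unfold Spec_from_data_to_object_ids; infer_instance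

-- ===== CLAIM (what is proved, stated in full; the proofs are below) =====
def Claim_equal_from_data_to_object_ids : Prop := ∀ (data : List (List (String × Int))), Dom_from_data_to_object_ids data → Spec_from_data_to_object_ids data (from_data_to_object_ids data)

-- ===== LEMMAS AND PROOFS =====

-- the truthy-id extraction shared by the proofs
def pvTruthy (v : Option Int) : Option Int :=
  match v with
  | some x => if x ≠ 0 then some x else none
  | none => none

lemma pvDedup_nil : pvDedup [] = [] := by simp [pvDedup]

lemma pvDedup_cons (x : Int) (l : List Int) :
    pvDedup (x :: l) = x :: pvDedup (l.filter (fun y => y != x)) := by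
  simp [pvDedup]

-- A's loop over data equals the simple append-if-new loop over the truthy ids.
lemma stepA_eq_foldl_truthy (data : List (List (String × Int))) : ∀ acc : List Int,
    data.foldl (fun unique_ids obj =>
        match (obj.find? (fun p => p.1 == "id")).map Prod.snd with
        | some uid => if uid ≠ 0 ∧ uid ∉ unique_ids then unique_ids ++ [uid] else unique_ids
        | none => unique_ids) acc
      = (data.filterMap (fun obj => pvTruthy ((obj.find? (fun p => p.1 == "id")).map Prod.snd))).foldl
          (fun unique_ids uid => if uid ∈ unique_ids then unique_ids else unique_ids ++ [uid]) acc := by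
  induction data with
  | nil => intro acc; rfl
  | cons obj rest ih =>
    intro acc
    simp only [List.foldl_cons, List.filterMap_cons]
    cases h : (obj.find? (fun p => p.1 == "id")).map Prod.snd with
    | none => simp [pvTruthy, ih]
    | some v =>
      by_cases hv : v = 0
      · subst hv; simp [pvTruthy, ih]
      · by_cases hm : v ∈ acc
        · simp [pvTruthy, hv, hm, ih]
        · simp [pvTruthy, hv, hm, ih]

-- the simple append-if-new loop equals acc followed by pvDedup of the not-yet-seen ids
lemma foldl_add_eq_dedup (l : List Int) : ∀ acc : List Int,
    l.foldl (fun unique_ids uid =>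
        if uid ∈ unique_ids then unique_ids else unique_ids ++ [uid]) acc
      = acc ++ pvDedup (l.filter (fun y => !acc.contains y)) := by
  induction l with
  | nil => intro acc; simp [pvDedup_nil]
  | cons x xs ih =>
    intro acc
    by_cases hx : x ∈ acc
    · simp only [List.foldl_cons, List.filter_cons]
      simp [hx, ih]
    · have harg : xs.filter (fun y => !(acc ++ [x]).contains y)
          = (xs.filter (fun y => !acc.contains y)).filter (fun y => y != x) := by
        rw [List.filter_filter]
        apply List.filter_congr
        intro y _
        by_cases h : y = x <;> simp [h]
      have hc : (!acc.contains x) = true := by simpa using hx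
      simp only [List.foldl_cons, List.filter_cons]
      rw [if_neg hx, ih (acc ++ [x]), if_pos hc, pvDedup_cons, ← harg, List.append_assoc]
      rfl

-- ===== VERDICT (by name: the statement is the Claim_ definition above) =====
theorem from_data_to_object_ids_spec : Claim_equal_from_data_to_object_ids := by
  intro data _
  unfold Spec_from_data_to_object_ids from_data_to_object_ids from_data_to_object_ids_alt
  rw [stepA_eq_foldl_truthy, foldl_add_eq_dedup]
  simp [List.filterMap_map, pvTruthy, Function.comp]
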